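-- pv_equiv track=rewrite | github.com/melikkul/KokTurk | scripts/eval_all_models.py | detect_context_type
-- ===== SOURCE A (Python) =====
-- def detect_context_type(state_dict: dict) -> str:
--     if any("context_encoder.bert" in k for k in state_dict):
--         return "berturk"
--     if any("context_encoder.dropout" in k for k in state_dict):
--         return "sentence_bigru"
--     if any("context_encoder.word_embed" in k for k in state_dict):
--         return "word2vec"
--     if any("context_encoder.pos_embed" in k for k in state_dict):
--         return "pos_bigram"
--     return "word2vec"
-- ===== SOURCE B (Python) =====
-- def detect_context_type(state_dict: dict) -> str:
--     # single pass: collect flags, then decide by priority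
--     has_bert = has_dropout = has_word = has_pos = False
--     for k in state_dict:
--         has_bert = has_bert or "context_encoder.bert" in k
--         has_dropout = has_dropout or "context_encoder.dropout" in k
--         has_word = has_word or "context_encoder.word_embed" in k
--         has_pos = has_pos or "context_encoder.pos_embed" in k
--     if has_bert:
--         return "berturk"
--     if has_dropout:
--         return "sentence_bigru"
--     if has_word:
--         return "word2vec"
--     if has_pos:
--         return "pos_bigram"
--     return "word2vec"
-- ===== Notes on version B (the rewrite author's own statement) =====
-- stated objective: alternative
-- what changed: A makes four separate early-exit any-scans over the keys; B scans the keys once, accumulating four boolean flags, and decides by priority after the loop.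
import Mathlib
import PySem

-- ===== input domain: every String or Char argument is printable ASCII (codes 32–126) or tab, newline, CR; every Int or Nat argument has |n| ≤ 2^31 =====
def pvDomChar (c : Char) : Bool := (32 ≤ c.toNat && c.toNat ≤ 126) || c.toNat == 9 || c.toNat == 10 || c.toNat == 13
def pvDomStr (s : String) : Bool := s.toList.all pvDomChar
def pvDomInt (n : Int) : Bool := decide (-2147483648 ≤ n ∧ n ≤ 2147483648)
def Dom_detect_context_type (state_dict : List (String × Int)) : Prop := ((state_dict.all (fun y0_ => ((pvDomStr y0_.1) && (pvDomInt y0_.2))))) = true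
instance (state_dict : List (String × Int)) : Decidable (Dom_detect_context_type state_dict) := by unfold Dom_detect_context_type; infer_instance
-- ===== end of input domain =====

-- B replaces A's four separate early-exit any-scans over the keys with a single pass
-- accumulating four boolean flags and a post-loop priority decision (objective: alternative).


-- ===== PORT A =====
def detect_context_type (state_dict : List (String × Int)) : String :=
  if state_dict.any (fun k => PySem.Str.isIn "context_encoder.bert" k.1) then "berturk"
  else if state_dict.any (fun k => PySem.Str.isIn "context_encoder.dropout" k.1) then "sentence_bigru"
  else if state_dict.any (fun k => PySem.Str.isIn "context_encoder.word_embed" k.1) then "word2vec"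
  else if state_dict.any (fun k => PySem.Str.isIn "context_encoder.pos_embed" k.1) then "pos_bigram"
  else "word2vec"

-- ===== PORT B =====
def detect_context_type_alt (state_dict : List (String × Int)) : String :=
  let flags := state_dict.foldl
    (fun (f : Bool × Bool × Bool × Bool) k =>
      (f.1 || PySem.Str.isIn "context_encoder.bert" k.1,
       f.2.1 || PySem.Str.isIn "context_encoder.dropout" k.1,
       f.2.2.1 || PySem.Str.isIn "context_encoder.word_embed" k.1,
       f.2.2.2 || PySem.Str.isIn "context_encoder.pos_embed" k.1))
    (false, false, false, false)
  if flags.1 then "berturk"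
  else if flags.2.1 then "sentence_bigru"
  else if flags.2.2.1 then "word2vec"
  else if flags.2.2.2 then "pos_bigram"
  else "word2vec"

-- ===== PRECONDITION & SPEC =====
def Spec_detect_context_type (state_dict : List (String × Int)) (out : String) : Prop := out = detect_context_type_alt state_dict
instance (state_dict : List (String × Int)) (out : String) : Decidable (Spec_detect_context_type state_dict out) := by unfold Spec_detect_context_type; infer_instance

-- ===== CLAIM (what is proved, stated in full; the proofs are below) =====
def Claim_equal_detect_context_type : Prop := ∀ (state_dict : List (String × Int)), Dom_detect_context_type state_dict → Spec_detect_context_type state_dict (detect_context_type state_dict)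

-- ===== LEMMAS AND PROOFS =====

-- The accumulated flags are exactly the four `any` tests.
theorem flags_eq_any (xs : List (String × Int)) (a b c d : Bool) :
    xs.foldl
      (fun (f : Bool × Bool × Bool × Bool) k =>
        (f.1 || PySem.Str.isIn "context_encoder.bert" k.1,
         f.2.1 || PySem.Str.isIn "context_encoder.dropout" k.1,
         f.2.2.1 || PySem.Str.isIn "context_encoder.word_embed" k.1,
         f.2.2.2 || PySem.Str.isIn "context_encoder.pos_embed" k.1))
      (a, b, c, d)
    = (a || xs.any (fun k => PySem.Str.isIn "context_encoder.bert" k.1),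
       b || xs.any (fun k => PySem.Str.isIn "context_encoder.dropout" k.1),
       c || xs.any (fun k => PySem.Str.isIn "context_encoder.word_embed" k.1),
       d || xs.any (fun k => PySem.Str.isIn "context_encoder.pos_embed" k.1)) := by
  induction xs generalizing a b c d with
  | nil => simp
  | cons x t ih => simp only [List.foldl_cons, List.any_cons, ih, Bool.or_assoc]

-- ===== VERDICT (by name: the statement is the Claim_ definition above) =====
theorem detect_context_type_spec : Claim_equal_detect_context_type := by
  intro xs _
  unfold Spec_detect_context_type detect_context_type detect_context_type_alt
  rw [flags_eq_any]
  simp only [Bool.false_or]
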